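-- pv_equiv track=rewrite | github.com/xlooslo/programmers | 알고리즘 고득점 Kit/힙/더 맵게(Queue).py | solution
-- ===== SOURCE A (Python) =====
-- from collections import deque
--
-- def solution(scv, K):
--     answer = 0
--     scv.sort()
--     cnt = len(scv)
--     scv = deque(scv)
--
--     while True:
--         if scv[0] >= K:
--             break
--
--         if cnt == 1:
--             answer = -1
--             break
--
--         scv[1] = scv[0] + scv[1] * 2
--         scv.popleft()
--
--         scv_sort(scv)
--
--         answer += 1
--         cnt -= 1
--
--     return answer
--
-- def scv_sort(scv):
--     for i in range(1, len(scv)):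
--         if scv[i-1] > scv[i]:
--             scv[i-1], scv[i] = scv[i], scv[i-1]
--     return
-- ===== SOURCE B (Python) =====
-- def solution(scv, K):
--     # Two-queue mixing: sort once, then keep produced mixes in a FIFO queue.
--     # The two smallest remaining values are always at the fronts of the two
--     # queues, so each mix is O(1) after the initial O(n log n) sort.
--     # (Unlike A, this does not mutate the caller's list.)
--     a = sorted(scv)
--     b = []
--     i = j = 0
--     mixes = 0
--     while True:
--         # smallest remaining value (IndexError on empty input, as in A)
--         if i < len(a) and (j >= len(b) or a[i] <= b[j]):
--             smallest = a[i]
--         else: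
--             smallest = b[j]
--         if smallest >= K:
--             return mixes
--         if (len(a) - i) + (len(b) - j) == 1:
--             return -1
--         # pop the two smallest
--         if i < len(a) and (j >= len(b) or a[i] <= b[j]):
--             u = a[i]; i += 1
--         else:
--             u = b[j]; j += 1
--         if i < len(a) and (j >= len(b) or a[i] <= b[j]):
--             v = a[i]; i += 1
--         else:
--             v = b[j]; j += 1
--         b.append(u + 2 * v)
--         mixes += 1
-- ===== Notes on version B (the rewrite author's own statement) =====
-- stated objective: faster
-- what changed: A re-sorts the deque with an O(n) bubble pass after every mix; B sorts once and then runs the classic two-queue trick (sorted originals + FIFO of produced mixes, pop the smaller front), so each mix is O(1).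
import Mathlib
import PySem

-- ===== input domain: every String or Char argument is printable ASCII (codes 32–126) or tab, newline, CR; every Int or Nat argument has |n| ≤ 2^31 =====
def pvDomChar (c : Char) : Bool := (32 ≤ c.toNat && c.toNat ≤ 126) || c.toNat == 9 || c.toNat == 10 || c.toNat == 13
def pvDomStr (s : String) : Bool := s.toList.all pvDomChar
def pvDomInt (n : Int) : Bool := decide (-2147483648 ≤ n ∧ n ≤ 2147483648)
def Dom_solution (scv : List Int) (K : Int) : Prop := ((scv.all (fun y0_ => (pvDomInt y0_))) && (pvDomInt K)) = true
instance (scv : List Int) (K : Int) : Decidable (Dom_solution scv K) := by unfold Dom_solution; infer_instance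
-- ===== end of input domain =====

-- B replaces A's per-mix O(n) bubble re-sort of the deque by the two-queue scheme
-- (sorted originals + FIFO of produced mixes), making each mix O(1) after one sort.
-- Note: Python A sorts the caller's list in place (a side effect B does not have);
-- the equivalence proved here is about the RETURN value.

-- ===== PORT A =====
-- scv_sort: one adjacent-swap pass over the deque (a single bubble pass)
def pvBubble : List Int → List Int
  | x :: y :: t => if x > y then y :: pvBubble (x :: t) else x :: pvBubble (y :: t)
  | l => l

-- needed by pvLoopA's termination proof (cited in decreasing_by)
theorem pvBubble_length (l : List Int) : (pvBubble l).length = l.length := by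
  induction l using pvBubble.induct <;> simp [pvBubble] <;> split <;> simp_all

-- the 'while True' loop of A; 'cnt' is always len(scv), kept as the list's length
def pvLoopA (K : Int) (scv : List Int) (answer : Int) : Int :=
  match scv with
  | [] => 0                                -- unreachable under Pre_ (scv[0] raises IndexError)
  | x :: rest =>
    if x ≥ K then answer
    else
      match rest with
      | [] => -1                           -- cnt == 1
      | y :: t => pvLoopA K (pvBubble ((x + y * 2) :: t)) (answer + 1)
termination_by scv.length
decreasing_by simp [pvBubble_length]

def solution (scv : List Int) (K : Int) : Int :=
  pvLoopA K (PySem.List.sorted scv (fun x => x) false) 0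

-- ===== PORT B =====
-- smallest remaining value: the smaller front of the two queues (a-queue wins ties)
def pvFront : List Int → List Int → Int
  | x :: _, [] => x
  | [], y :: _ => y
  | x :: _, y :: _ => if x ≤ y then x else y
  | [], [] => 0                            -- unreachable: Python raises IndexError

-- pop the smaller front: returns (popped value, rest of a, rest of b)
def pvPop : List Int → List Int → Int × List Int × List Int
  | x :: a, [] => (x, a, [])
  | [], y :: b => (y, [], b)
  | x :: a, y :: b => if x ≤ y then (x, a, y :: b) else (y, x :: a, b)
  | [], [] => (0, [], [])                  -- unreachable

-- needed by pvLoopB's termination proof (cited in decreasing_by)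
theorem pvPop_length (a b : List Int) (h : a.length + b.length ≠ 0) :
    ((pvPop a b).2.1).length + ((pvPop a b).2.2).length + 1 = a.length + b.length := by
  match a, b with
  | x :: a, [] => simp [pvPop]
  | [], y :: b => simp [pvPop]
  | x :: a, y :: b => simp only [pvPop]; split <;> simp <;> omega
  | [], [] => simp at h

def pvLoopB (K : Int) (a b : List Int) (mixes : Int) : Int :=
  if a.length + b.length = 0 then 0        -- unreachable under Pre_ (b[j] raises IndexError)
  else if pvFront a b ≥ K then mixes
  else if a.length + b.length = 1 then -1
  else
    pvLoopB K (pvPop (pvPop a b).2.1 (pvPop a b).2.2).2.1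
      ((pvPop (pvPop a b).2.1 (pvPop a b).2.2).2.2 ++ [(pvPop a b).1 + 2 * (pvPop (pvPop a b).2.1 (pvPop a b).2.2).1])
      (mixes + 1)
termination_by a.length + b.length
decreasing_by
  have h1 := pvPop_length a b (by omega)
  have h2 := pvPop_length (pvPop a b).2.1 (pvPop a b).2.2 (by omega)
  simp only [List.length_append, List.length_cons, List.length_nil]
  omega

def solution_alt (scv : List Int) (K : Int) : Int :=
  pvLoopB K (PySem.List.sorted scv (fun x => x) false) [] 0

-- ===== PRECONDITION & SPEC =====
-- Pre_ excludes only the empty list, on which A raises IndexError (scv[0]).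
def Pre_solution (scv : List Int) (K : Int) : Prop := scv ≠ []
instance (scv : List Int) (K : Int) : Decidable (Pre_solution scv K) := by unfold Pre_solution; infer_instance
def pvWitness_solution : List Int × Int := ([1, 2, 3, 9, 10, 12], 7)

def Spec_solution (scv : List Int) (K : Int) (out : Int) : Prop := out = solution_alt scv K
instance (scv : List Int) (K : Int) (out : Int) : Decidable (Spec_solution scv K out) := by unfold Spec_solution; infer_instance

-- ===== CLAIM (what is proved, stated in full; the proofs are below) =====
def Claim_equal_solution : Prop := ∀ (scv : List Int) (K : Int), Dom_solution scv K → Pre_solution scv K → Spec_solution scv K (solution scv K)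

-- ===== LEMMAS AND PROOFS =====

theorem pvBubble_perm (l : List Int) : (pvBubble l).Perm l := by
  induction l using pvBubble.induct with
  | case1 x y t h ih =>
    simp only [pvBubble, if_pos h]
    exact (ih.cons y).trans (List.Perm.swap x y t)
  | case2 x y t h ih =>
    simp only [pvBubble, if_neg h]
    exact ih.cons x
  | case3 l h =>
    have : pvBubble l = l := by
      match l with
      | [] => simp [pvBubble]
      | [x] => simp [pvBubble]
      | x :: y :: t => exact absurd rfl (h x y t)
    rw [this]

theorem pvBubble_mem {z : Int} {l : List Int} (h : z ∈ pvBubble l) : z ∈ l :=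
  (pvBubble_perm l).mem_iff.mp h

theorem pvBubble_eq_self {l : List Int} (h : l.Pairwise (· ≤ ·)) : pvBubble l = l := by
  induction l using pvBubble.induct with
  | case1 x y t hgt ih =>
    rcases List.pairwise_cons.mp h with ⟨h1, _⟩
    have := h1 y (by simp)
    omega
  | case2 x y t hle ih =>
    rcases List.pairwise_cons.mp h with ⟨h1, h2⟩
    simp only [pvBubble, if_neg hle]
    rw [ih h2]
  | case3 l h3 =>
    match l with
    | [] => simp [pvBubble]
    | [x] => simp [pvBubble]
    | x :: y :: t => exact absurd rfl (h3 x y t)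

theorem pvBubble_pairwise {v : Int} {t : List Int} (h : t.Pairwise (· ≤ ·)) :
    (pvBubble (v :: t)).Pairwise (· ≤ ·) := by
  induction t generalizing v with
  | nil => simp [pvBubble]
  | cons y t' ih =>
    rcases List.pairwise_cons.mp h with ⟨hy, ht'⟩
    by_cases hvy : v > y
    · simp only [pvBubble, if_pos hvy]
      refine List.pairwise_cons.mpr ⟨?_, ih ht'⟩
      intro z hz
      rcases List.mem_cons.mp (pvBubble_mem hz) with hz | hz
      · omega
      · exact hy z hz
    · simp only [pvBubble, if_neg hvy]
      have heq : pvBubble (y :: t') = y :: t' := pvBubble_eq_self h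
      rw [heq]
      refine List.pairwise_cons.mpr ⟨?_, h⟩
      intro z hz
      rcases List.mem_cons.mp hz with hz | hz
      · omega
      · exact le_trans (by omega) (hy z hz)

def pvMerge : List Int → List Int → List Int
  | [], b => b
  | x :: a, [] => x :: a
  | x :: a, y :: b => if x ≤ y then x :: pvMerge a (y :: b) else y :: pvMerge (x :: a) b

@[simp] theorem pvMerge_nil_left (b : List Int) : pvMerge [] b = b := by simp [pvMerge]

@[simp] theorem pvMerge_nil_right (a : List Int) : pvMerge a [] = a := by
  cases a <;> simp [pvMerge]

theorem pvMerge_perm (a b : List Int) : (pvMerge a b).Perm (a ++ b) := by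
  induction a, b using pvMerge.induct with
  | case1 b => simp
  | case2 x a => simp
  | case3 x a y b hle ih =>
    simp only [pvMerge, if_pos hle]
    exact (ih.cons x).trans (by simp)
  | case4 x a y b hle ih =>
    simp only [pvMerge, if_neg hle]
    refine (ih.cons y).trans ?_
    exact (List.Perm.swap x y _).trans ((List.perm_middle.symm).cons x)

theorem pvMerge_length (a b : List Int) : (pvMerge a b).length = a.length + b.length := by
  simpa using (pvMerge_perm a b).length_eq

theorem pvMerge_pairwise {a b : List Int} (ha : a.Pairwise (· ≤ ·)) (hb : b.Pairwise (· ≤ ·)) :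
    (pvMerge a b).Pairwise (· ≤ ·) := by
  induction a, b using pvMerge.induct with
  | case1 b => simpa using hb
  | case2 x a => simpa using ha
  | case3 x a y b hle ih =>
    rcases List.pairwise_cons.mp ha with ⟨hx, ha'⟩
    simp only [pvMerge, if_pos hle]
    refine List.pairwise_cons.mpr ⟨?_, ih ha' hb⟩
    intro z hz
    rcases List.mem_append.mp ((pvMerge_perm a (y :: b)).mem_iff.mp hz) with hz | hz
    · exact hx z hz
    · rcases List.mem_cons.mp hz with hz | hz
      · omega
      · exact le_trans hle ((List.pairwise_cons.mp hb).1 z hz)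
  | case4 x a y b hle ih =>
    rcases List.pairwise_cons.mp hb with ⟨hy, hb'⟩
    simp only [pvMerge, if_neg hle]
    refine List.pairwise_cons.mpr ⟨?_, ih ha hb'⟩
    intro z hz
    rcases List.mem_append.mp ((pvMerge_perm (x :: a) b).mem_iff.mp hz) with hz | hz
    · rcases List.mem_cons.mp hz with hz | hz
      · omega
      · exact le_trans (by omega) ((List.pairwise_cons.mp ha).1 z hz)
    · exact hy z hz

theorem pvFront_eq_pop (a b : List Int) : pvFront a b = (pvPop a b).1 := by
  cases a <;> cases b <;> simp [pvFront, pvPop] <;> split <;> rfl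

theorem pvPop_merge {a b : List Int} (h : a.length + b.length ≠ 0) :
    pvMerge a b = (pvPop a b).1 :: pvMerge (pvPop a b).2.1 (pvPop a b).2.2 := by
  match a, b with
  | x :: a, [] => simp [pvPop]
  | [], y :: b => simp [pvPop]
  | x :: a, y :: b =>
    simp only [pvPop, pvMerge]
    split <;> simp
  | [], [] => simp at h

theorem pvPop_cases {a b : List Int} (h : a.length + b.length ≠ 0) :
    (∃ x a', a = x :: a' ∧ pvPop a b = (x, a', b)) ∨
    (∃ y b', b = y :: b' ∧ pvPop a b = (y, a, b')) := by
  match a, b with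
  | x :: a, [] => exact Or.inl ⟨x, a, rfl, rfl⟩
  | [], y :: b => exact Or.inr ⟨y, b, rfl, rfl⟩
  | x :: a, y :: b =>
    by_cases hxy : x ≤ y
    · exact Or.inl ⟨x, a, rfl, by simp [pvPop, if_pos hxy]⟩
    · exact Or.inr ⟨y, b, rfl, by simp [pvPop, if_neg hxy]⟩
  | [], [] => simp at h

theorem pvPop_fst_mem {a b : List Int} (h : a.length + b.length ≠ 0) :
    (pvPop a b).1 ∈ a ∨ (pvPop a b).1 ∈ b := by
  rcases pvPop_cases h with ⟨x, a', ha, hp⟩ | ⟨y, b', hb, hp⟩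
  · rw [hp]; exact Or.inl (by rw [ha]; simp)
  · rw [hp]; exact Or.inr (by rw [hb]; simp)

theorem pvPop_mem_left {z : Int} {a b : List Int} (h : z ∈ (pvPop a b).2.1) : z ∈ a := by
  match a, b with
  | [], [] => simp [pvPop] at h
  | x :: a, [] => simp only [pvPop] at h; simp [h]
  | [], y :: b => simp [pvPop] at h
  | x :: a, y :: b =>
    simp only [pvPop] at h
    split at h <;> simp_all

theorem pvPop_mem_right {z : Int} {a b : List Int} (h : z ∈ (pvPop a b).2.2) : z ∈ b := by
  match a, b with
  | [], [] => simp [pvPop] at h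
  | x :: a, [] => simp [pvPop] at h
  | [], y :: b => simp only [pvPop] at h; simp [h]
  | x :: a, y :: b =>
    simp only [pvPop] at h
    split at h <;> simp_all

theorem pvPop_pairwise {a b : List Int} (ha : a.Pairwise (· ≤ ·)) (hb : b.Pairwise (· ≤ ·)) :
    ((pvPop a b).2.1).Pairwise (· ≤ ·) ∧ ((pvPop a b).2.2).Pairwise (· ≤ ·) := by
  match a, b with
  | [], [] => simp [pvPop]
  | x :: a, [] => exact ⟨(List.pairwise_cons.mp ha).2, by simp [pvPop]⟩
  | [], y :: b => exact ⟨by simp [pvPop], (List.pairwise_cons.mp hb).2⟩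
  | x :: a, y :: b =>
    simp only [pvPop]
    split
    · exact ⟨(List.pairwise_cons.mp ha).2, hb⟩
    · exact ⟨ha, (List.pairwise_cons.mp hb).2⟩

theorem pvPop_le {a b : List Int} (ha : a.Pairwise (· ≤ ·)) (hb : b.Pairwise (· ≤ ·))
    (z : Int) (hz : z ∈ (pvPop a b).2.1 ∨ z ∈ (pvPop a b).2.2) : (pvPop a b).1 ≤ z := by
  match a, b with
  | [], [] => simp [pvPop] at hz
  | x :: a, [] =>
    simp only [pvPop] at hz ⊢
    rcases hz with hz | hz
    · exact (List.pairwise_cons.mp ha).1 z hz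
    · simp at hz
  | [], y :: b =>
    simp only [pvPop] at hz ⊢
    rcases hz with hz | hz
    · simp at hz
    · exact (List.pairwise_cons.mp hb).1 z hz
  | x :: a, y :: b =>
    by_cases hxy : x ≤ y
    · simp only [pvPop, if_pos hxy] at hz ⊢
      rcases hz with hz | hz
      · exact (List.pairwise_cons.mp ha).1 z hz
      · rcases List.mem_cons.mp hz with hz | hz
        · omega
        · exact le_trans hxy ((List.pairwise_cons.mp hb).1 z hz)
    · simp only [pvPop, if_neg hxy] at hz ⊢
      rcases hz with hz | hz
      · rcases List.mem_cons.mp hz with hz | hz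
        · omega
        · exact le_trans (by omega) ((List.pairwise_cons.mp ha).1 z hz)
      · exact (List.pairwise_cons.mp hb).1 z hz
def chainQ (lo : Int) (b : List Int) (w : Int) : Prop :=
  match b with
  | [] => True
  | c :: t => ∃ p q, lo ≤ p ∧ p ≤ q ∧ q ≤ w ∧ c = p + 2 * q ∧ chainQ q t w

theorem chainQ_mono_lo {lo lo' w : Int} {b : List Int} (h : lo' ≤ lo) (hc : chainQ lo b w) :
    chainQ lo' b w := by
  cases b with
  | nil => trivial
  | cons c t =>
    obtain ⟨p, q, h1, h2, h3, h4, h5⟩ := hc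
    exact ⟨p, q, by omega, h2, h3, h4, h5⟩

theorem chainQ_mem {lo w c : Int} {b : List Int} (hc : chainQ lo b w) (hm : c ∈ b) :
    ∃ p q, p ≤ q ∧ q ≤ w ∧ c = p + 2 * q := by
  induction b generalizing lo with
  | nil => simp at hm
  | cons c' t ih =>
    obtain ⟨p, q, h1, h2, h3, h4, h5⟩ := hc
    rcases List.mem_cons.mp hm with hm | hm
    · exact ⟨p, q, h2, h3, by omega⟩
    · exact ih h5 hm

theorem chainQ_lb {lo w : Int} {b : List Int} (hc : chainQ lo b w) :
    ∀ z ∈ b, 3 * lo ≤ z := by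
  induction b generalizing lo with
  | nil => simp
  | cons c t ih =>
    obtain ⟨p, q, h1, h2, h3, h4, h5⟩ := hc
    intro z hz
    rcases List.mem_cons.mp hz with hz | hz
    · omega
    · have := ih h5 z hz; omega

theorem chainQ_pairwise {lo w : Int} {b : List Int} (hc : chainQ lo b w) :
    b.Pairwise (· ≤ ·) := by
  induction b generalizing lo with
  | nil => simp
  | cons c t ih =>
    obtain ⟨p, q, h1, h2, h3, h4, h5⟩ := hc
    refine List.pairwise_cons.mpr ⟨?_, ih h5⟩
    intro z hz
    have := chainQ_lb h5 z hz
    omega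

theorem chainQ_append {lo w u v : Int} {b : List Int} (hc : chainQ lo b w)
    (hlo : lo ≤ u) (hwu : w ≤ u) (huv : u ≤ v) : chainQ lo (b ++ [u + 2 * v]) v := by
  induction b generalizing lo with
  | nil => exact ⟨u, v, hlo, huv, le_refl v, rfl, trivial⟩
  | cons c t ih =>
    obtain ⟨p, q, h1, h2, h3, h4, h5⟩ := hc
    exact ⟨p, q, h1, h2, by omega, h4, ih h5 (by omega)⟩

-- the loop invariant of B: a-queue sorted above w (the last popped value), and the
-- product queue is a chain of mixes p+2q of nondecreasing earlier pops (mode 1), or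
-- a single just-produced mix lying below w (mode 2)
def pvINV (a b : List Int) (w : Int) : Prop :=
  a.Pairwise (· ≤ ·) ∧ (∀ x ∈ a, w ≤ x) ∧
  (((∀ c ∈ b, w ≤ c) ∧ ∃ lo, chainQ lo b w) ∨
   (∃ c p q, b = [c] ∧ p ≤ q ∧ q ≤ w ∧ c = p + 2 * q ∧ c < w))

theorem pvINV_b_pairwise {a b : List Int} {w : Int} (h : pvINV a b w) :
    b.Pairwise (· ≤ ·) := by
  rcases h.2.2 with ⟨-, lo, hc⟩ | ⟨c, p, q, hb, -⟩
  · exact chainQ_pairwise hc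
  · rw [hb]; simp

theorem pvPop_chain {lo w : Int} {a b : List Int} (hc : chainQ lo b w) :
    ∃ lo', chainQ lo' (pvPop a b).2.2 w := by
  match a, b with
  | [], [] => exact ⟨lo, trivial⟩
  | x :: a, [] => exact ⟨lo, by simp [pvPop]; trivial⟩
  | [], y :: b =>
    obtain ⟨p, q, h1, h2, h3, h4, h5⟩ := hc
    exact ⟨q, by simpa [pvPop] using h5⟩
  | x :: a, y :: b =>
    by_cases hxy : x ≤ y
    · exact ⟨lo, by simpa [pvPop, if_pos hxy] using hc⟩
    · obtain ⟨p, q, h1, h2, h3, h4, h5⟩ := hc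
      exact ⟨q, by simpa [pvPop, if_neg hxy] using h5⟩

theorem pvINV_step {a b : List Int} {w : Int} (hinv : pvINV a b w)
    (hlen : 2 ≤ a.length + b.length) :
    pvINV (pvPop (pvPop a b).2.1 (pvPop a b).2.2).2.1
      ((pvPop (pvPop a b).2.1 (pvPop a b).2.2).2.2 ++
        [(pvPop a b).1 + 2 * (pvPop (pvPop a b).2.1 (pvPop a b).2.2).1])
      (pvPop (pvPop a b).2.1 (pvPop a b).2.2).1 := by
  obtain ⟨ha, hwa, hmode⟩ := hinv
  have hb : b.Pairwise (· ≤ ·) := pvINV_b_pairwise ⟨ha, hwa, hmode⟩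
  have hne1 : a.length + b.length ≠ 0 := by omega
  have hlen1 := pvPop_length a b hne1
  set u := (pvPop a b).1 with hu
  set a1 := (pvPop a b).2.1 with ha1
  set b1 := (pvPop a b).2.2 with hb1
  have hne2 : a1.length + b1.length ≠ 0 := by omega
  set v := (pvPop a1 b1).1 with hv
  set a2 := (pvPop a1 b1).2.1 with ha2
  set b2 := (pvPop a1 b1).2.2 with hb2
  have ha1p : a1.Pairwise (· ≤ ·) := (pvPop_pairwise ha hb).1
  have hb1p : b1.Pairwise (· ≤ ·) := (pvPop_pairwise ha hb).2
  have ha2p : a2.Pairwise (· ≤ ·) := (pvPop_pairwise ha1p hb1p).1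
  have hb2p : b2.Pairwise (· ≤ ·) := (pvPop_pairwise ha1p hb1p).2
  have hv_mem : v ∈ a1 ∨ v ∈ b1 := pvPop_fst_mem hne2
  have huv : u ≤ v := pvPop_le ha hb v (by
    rcases hv_mem with h | h
    · exact Or.inl (ha1 ▸ h)
    · exact Or.inr (hb1 ▸ h))
  have hva2 : ∀ x ∈ a2, v ≤ x := fun x hx => pvPop_le ha1p hb1p x (Or.inl hx)
  have hvb2 : ∀ x ∈ b2, v ≤ x := fun x hx => pvPop_le ha1p hb1p x (Or.inr hx)
  have hu_mem : u ∈ a ∨ u ∈ b := pvPop_fst_mem hne1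
  rcases hmode with ⟨hwb, lo, hch⟩ | ⟨c, p, q, hbeq, hpq, hqw, hcf, hcw⟩
  · -- mode 1
    have hwu : w ≤ u := by rcases hu_mem with h | h; exacts [hwa u h, hwb u h]
    have hwv : w ≤ v := by
      rcases hv_mem with h | h
      · exact hwa v (pvPop_mem_left (a := a) (b := b) (ha1 ▸ h))
      · exact hwb v (pvPop_mem_right (a := a) (b := b) (hb1 ▸ h))
    by_cases hnv : v ≤ u + 2 * v
    · refine ⟨ha2p, hva2, Or.inl ⟨?_, ?_⟩⟩
      · intro z hz
        rcases List.mem_append.mp hz with hz | hz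
        · exact hvb2 z hz
        · simp at hz; omega
      · obtain ⟨lo1, hch1⟩ := pvPop_chain (a := a) hch
        obtain ⟨lo2, hch2⟩ := pvPop_chain (a := a1) hch1
        exact ⟨min lo2 u, chainQ_append (chainQ_mono_lo (min_le_left lo2 u) hch2)
          (min_le_right lo2 u) hwu huv⟩
    · have hb2nil : b2 = [] := by
        by_contra hne
        obtain ⟨z, hz⟩ := List.exists_mem_of_ne_nil b2 hne
        have hzv : v ≤ z := hvb2 z hz
        have hzb : z ∈ b := pvPop_mem_right (a := a) (b := b)
          (hb1 ▸ pvPop_mem_right (a := a1) (b := b1) (hb2 ▸ hz))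
        obtain ⟨p, q, hpq, hqw, hzf⟩ := chainQ_mem hch hzb
        omega
      refine ⟨ha2p, hva2, Or.inr ⟨u + 2 * v, u, v, by rw [hb2nil]; rfl, huv,
        le_refl v, rfl, by omega⟩⟩
  · -- mode 2: b = [c] with c < w; the first pop must take c from b
    rcases pvPop_cases hne1 with ⟨x, a', hax, hpe⟩ | ⟨y, b', hby, hpe⟩
    · exfalso
      have hcb1 : c ∈ b1 := by rw [hb1, hpe]; rw [hbeq]; simp
      have hc_le : u ≤ c := pvPop_le ha hb c (Or.inr hcb1)
      have hwx : w ≤ u := by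
        rw [hu, hpe]
        exact hwa x (by rw [hax]; simp)
      omega
    · rw [hbeq] at hby
      have hyc : c = y ∧ [] = b' := by
        have := List.cons.injEq c [] y b' ▸ hby
        simpa using this
      have hueq : u = c := by rw [hu, hpe, hyc.1]
      have hb1eq : b1 = [] := by rw [hb1, hpe, ← hyc.2]
      have ha1eq : a1 = a := by rw [ha1, hpe]
      rcases pvPop_cases hne2 with ⟨x, a', hax, hpe2⟩ | ⟨y2, b'', hb1y, hpe2⟩
      swap
      · rw [hb1eq] at hb1y; simp at hb1y
      have hveq : v = x := by rw [hv, hpe2]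
      have hb2eq : b2 = [] := by rw [hb2, hpe2, hb1eq]
      have hwv : w ≤ v := by
        rw [hveq]
        exact hwa x (by rw [← ha1eq, hax]; simp)
      by_cases hnv : v ≤ u + 2 * v
      · refine ⟨ha2p, hva2, Or.inl ⟨?_, ⟨u, ?_⟩⟩⟩
        · intro z hz
          rw [hb2eq] at hz
          simp at hz
          omega
        · rw [hb2eq]
          exact ⟨u, v, le_refl u, huv, le_refl v, by simp, trivial⟩
      · exact ⟨ha2p, hva2, Or.inr ⟨u + 2 * v, u, v, by rw [hb2eq]; rfl, huv,
          le_refl v, rfl, by omega⟩⟩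

theorem pvLoopA_nil (K ans : Int) : pvLoopA K [] ans = 0 := by simp [pvLoopA]

theorem pvLoopA_ge {K x : Int} (rest : List Int) (ans : Int) (h : x ≥ K) :
    pvLoopA K (x :: rest) ans = ans := by
  cases rest <;> simp [pvLoopA, h]

theorem pvLoopA_one {K x : Int} (ans : Int) (h : ¬ x ≥ K) :
    pvLoopA K [x] ans = -1 := by simp [pvLoopA, h]

theorem pvLoopA_step {K x y : Int} (t : List Int) (ans : Int) (h : ¬ x ≥ K) :
    pvLoopA K (x :: y :: t) ans = pvLoopA K (pvBubble ((x + y * 2) :: t)) (ans + 1) := by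
  simp [pvLoopA, h]

-- main loop correspondence: under the invariant, B's two-queue loop computes A's loop
-- on the merge of the two queues
theorem pvLoopB_eq_loopA (K : Int) : ∀ (n : Nat) (a b : List Int) (w ans : Int),
    a.length + b.length = n → pvINV a b w →
    pvLoopB K a b ans = pvLoopA K (pvMerge a b) ans := by
  intro n
  induction n using Nat.strong_induction_on with
  | _ n IH =>
    intro a b w ans hn hinv
    rw [pvLoopB]
    by_cases h0 : a.length + b.length = 0
    · rw [if_pos h0]
      have ha0 : a = [] := List.length_eq_zero_iff.mp (by omega)
      have hb0 : b = [] := List.length_eq_zero_iff.mp (by omega)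
      subst ha0 hb0
      rw [pvMerge_nil_left, pvLoopA_nil]
    · rw [if_neg h0]
      have hm1 := pvPop_merge h0
      rw [pvFront_eq_pop]
      by_cases hK : (pvPop a b).1 ≥ K
      · rw [if_pos hK, hm1, pvLoopA_ge _ _ hK]
      · rw [if_neg hK]
        by_cases h1 : a.length + b.length = 1
        · rw [if_pos h1, hm1]
          have hrest : pvMerge (pvPop a b).2.1 (pvPop a b).2.2 = [] := by
            apply List.length_eq_zero_iff.mp
            rw [pvMerge_length]
            have := pvPop_length a b h0
            omega
          rw [hrest, pvLoopA_one _ hK]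
        · rw [if_neg h1]
          have h2 : 2 ≤ a.length + b.length := by omega
          have hlen1 := pvPop_length a b h0
          have hne2 : (pvPop a b).2.1.length + (pvPop a b).2.2.length ≠ 0 := by omega
          have hlen2 := pvPop_length (pvPop a b).2.1 (pvPop a b).2.2 hne2
          have hm2 := pvPop_merge hne2
          have hinv2 := pvINV_step hinv h2
          set u := (pvPop a b).1 with hu
          set v := (pvPop (pvPop a b).2.1 (pvPop a b).2.2).1 with hv
          set a2 := (pvPop (pvPop a b).2.1 (pvPop a b).2.2).2.1 with ha2
          set b2 := (pvPop (pvPop a b).2.1 (pvPop a b).2.2).2.2 with hb2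
          have hIH := IH (a2.length + (b2 ++ [u + 2 * v]).length) (by simp; omega)
            a2 (b2 ++ [u + 2 * v]) v (ans + 1) rfl hinv2
          rw [hIH, hm1, hm2]
          rw [pvLoopA_step _ _ hK]
          congr 1
          -- both sides are sorted lists of the same multiset
          have ha2p : a2.Pairwise (· ≤ ·) := hinv2.1
          have hbnp : (b2 ++ [u + 2 * v]).Pairwise (· ≤ ·) := pvINV_b_pairwise hinv2
          have hb2p : b2.Pairwise (· ≤ ·) :=
            hbnp.sublist (List.sublist_append_left b2 [u + 2 * v])
          have hrp : (pvMerge a2 b2).Pairwise (· ≤ ·) := pvMerge_pairwise ha2p hb2p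
          have hperm : (pvMerge a2 (b2 ++ [u + 2 * v])).Perm
              (pvBubble ((u + v * 2) :: pvMerge a2 b2)) := by
            refine (pvMerge_perm a2 (b2 ++ [u + 2 * v])).trans ?_
            refine List.Perm.trans ?_ (pvBubble_perm _).symm
            have heq : u + v * 2 = u + 2 * v := by ring
            rw [heq, ← List.append_assoc]
            exact (List.perm_append_singleton _ _).trans
              ((pvMerge_perm a2 b2).symm.cons _)
          exact List.Perm.eq_of_pairwise
            (fun a b _ _ h1 h2 => le_antisymm h1 h2)
            (pvMerge_pairwise ha2p hbnp) (pvBubble_pairwise hrp) hperm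

-- ===== VERDICT (by name: the statement is the Claim_ definition above) =====
theorem solution_spec : Claim_equal_solution := by
  unfold Claim_equal_solution
  intro scv K hdom hpre
  unfold Spec_solution solution solution_alt
  have hperm := PySem.List.sorted_perm scv (fun x => x) false
  set s := PySem.List.sorted scv (fun x => x) false with hs
  have hsne : s ≠ [] := by
    intro h
    exact hpre ((h ▸ hperm).symm.eq_nil)
  obtain ⟨x, t, hxt⟩ : ∃ x t, s = x :: t := by
    cases hc : s with
    | nil => exact absurd hc hsne
    | cons x t => exact ⟨x, t, rfl⟩
  have hsp : s.Pairwise (· ≤ ·) := by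
    simpa using PySem.List.sorted_pairwise scv (fun x => x)
  have hhead : ∀ y ∈ s, x ≤ y := by
    intro y hy
    have := PySem.List.key_head_sorted_le (xs := scv) (key := fun x => x) hxt y
      (hperm.mem_iff.mp hy)
    simpa using this
  have hinv : pvINV s [] x := ⟨hsp, hhead, Or.inl ⟨by simp, ⟨0, trivial⟩⟩⟩
  have h := pvLoopB_eq_loopA K s.length s [] x 0 (by simp) hinv
  rw [pvMerge_nil_right] at h
  exact h.symm
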